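-- pv_equiv track=rewrite | github.com/JanKulbinski/Compression | lab6/zad1.py | quantization
-- ===== SOURCE A (Python) =====
-- def quantization(red, green, blue, bits):
--     height = len(red)
--     width = len(red[0])
--     interval = 2 ** (8-bits)
--     resultRed =  [[0 for x in range(width)] for y in range(height)]
--     resultGreen =  [[0 for x in range(width)] for y in range(height)]
--     resultBlue =  [[0 for x in range(width)] for y in range(height)]
--
--     previous = 0
--     for y in range(height):
--         for x in range(width):
--             diff = blue[y][x] - guantizateOne(previous,interval)
--             resultBlue[y][x] = guantizateToFile(diff, interval)
--
--             diff = green[y][x] - guantizateOne(blue[y][x],interval)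
--             resultGreen[y][x] = guantizateToFile(diff, interval)
--
--             diff = red[y][x] - guantizateOne(green[y][x],interval)
--             resultRed[y][x] = guantizateToFile(diff, interval)
--
--             previous = red[y][x]
--     return resultRed, resultGreen, resultBlue
--
-- def guantizateOne(valueToQuantize, interval):
--         return (valueToQuantize // interval) * interval + (interval // 2)
--
-- def guantizateToFile(valueToQuantize, interval):
--     if valueToQuantize >= 0:
--         r = (valueToQuantize // interval) * interval + (interval // 2)
--         if r < 128:
--             return r + 128
--         else:
--             return 128 + (interval // 2)
--     else:
--         r = -(((-valueToQuantize) // interval) * interval + (interval // 2))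
--         if r > -128:
--             return r + 128
--         else:
--             return (interval // 2)
-- ===== SOURCE B (Python) =====
-- def quantization(red, green, blue, bits):
--     height = len(red)
--     width = len(red[0])
--     interval = 2 ** (8 - bits)
--
--     def q(v):
--         # reconstructed quantized value (same formula as guantizateOne)
--         return (v // interval) * interval + interval // 2
--
--     # flatten each channel into a row-major 1-D stream
--     flat_r = [red[y][x] for y in range(height) for x in range(width)]
--     flat_g = [green[y][x] for y in range(height) for x in range(width)]
--     flat_b = [blue[y][x] for y in range(height) for x in range(width)]
--
--     # element-wise zips of (possibly shifted) streams: blue is predicted from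
--     # the red stream delayed by one pixel (0 before the first)
--     out_r = [guantizateToFile(r - q(g), interval) for r, g in zip(flat_r, flat_g)]
--     out_g = [guantizateToFile(g - q(b), interval) for g, b in zip(flat_g, flat_b)]
--     out_b = [guantizateToFile(b - q(p), interval) for b, p in zip(flat_b, [0] + flat_r)]
--
--     # reshape the streams back into height x width matrices
--     def chunk(flat):
--         return [flat[y * width:(y + 1) * width] for y in range(height)]
--
--     return chunk(out_r), chunk(out_g), chunk(out_b)
--
-- def guantizateToFile(valueToQuantize, interval):
--     if valueToQuantize >= 0:
--         r = (valueToQuantize // interval) * interval + (interval // 2)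
--         if r < 128:
--             return r + 128
--         else:
--             return 128 + (interval // 2)
--     else:
--         r = -(((-valueToQuantize) // interval) * interval + (interval // 2))
--         if r > -128:
--             return r + 128
--         else:
--             return (interval // 2)
-- ===== Notes on version B (the rewrite author's own statement) =====
-- stated objective: alternative
-- what changed: Replaces A's preallocate-then-mutate nested index loop carrying a running 'previous' variable by a stream pipeline: each channel is flattened to a row-major 1-D list, the output streams are element-wise zips of these lists (the red stream delayed by one element for the blue channel), and the results are reshaped back into rows by slicing.
import Mathlib
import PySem

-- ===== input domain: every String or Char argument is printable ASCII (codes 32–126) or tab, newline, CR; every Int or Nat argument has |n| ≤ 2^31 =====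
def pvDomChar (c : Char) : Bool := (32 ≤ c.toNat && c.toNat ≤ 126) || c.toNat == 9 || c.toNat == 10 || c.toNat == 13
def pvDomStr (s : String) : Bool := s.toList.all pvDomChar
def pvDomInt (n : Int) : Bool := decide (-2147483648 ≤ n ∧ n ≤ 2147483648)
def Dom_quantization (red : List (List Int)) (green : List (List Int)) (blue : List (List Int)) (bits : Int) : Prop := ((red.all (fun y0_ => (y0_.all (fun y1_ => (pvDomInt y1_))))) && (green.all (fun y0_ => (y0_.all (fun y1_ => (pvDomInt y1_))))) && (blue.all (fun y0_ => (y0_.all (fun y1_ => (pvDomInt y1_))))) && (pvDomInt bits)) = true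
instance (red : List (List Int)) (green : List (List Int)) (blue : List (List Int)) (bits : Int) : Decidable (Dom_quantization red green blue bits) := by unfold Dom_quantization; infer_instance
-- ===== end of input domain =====

-- B replaces A's preallocate-and-mutate nested index loop carrying a running 'previous'
-- by a stream pipeline: flatten each channel row-major, zip the streams element-wise
-- (the red stream delayed by one pixel for the blue channel), reshape by slicing
-- (objective: alternative); equivalence of return values is proved on Pre_
-- (inputs where Python A returns int matrices).

-- ===== PORT A =====
-- guantizateOne(valueToQuantize, interval)
def gOne (v iv : Int) : Int :=
  PySem.Int.floordiv v iv * iv + PySem.Int.floordiv iv 2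

-- guantizateToFile(valueToQuantize, interval)
def gFile (v iv : Int) : Int :=
  if v ≥ 0 then
    let r := PySem.Int.floordiv v iv * iv + PySem.Int.floordiv iv 2
    if r < 128 then r + 128 else 128 + PySem.Int.floordiv iv 2
  else
    let r := -(PySem.Int.floordiv (-v) iv * iv + PySem.Int.floordiv iv 2)
    if r > -128 then r + 128 else PySem.Int.floordiv iv 2

-- resultX[y][x] = v  (in range on Pre_; pySetD/pyGetD are the total forms)
def msetA (m : List (List Int)) (y x : Int) (v : Int) : List (List Int) :=
  PySem.List.pySetD m y (PySem.List.pySetD (PySem.List.pyGetD m y []) x v)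

-- the body of A's inner loop (one pixel), state = (resultRed, resultGreen, resultBlue, previous)
def pixelStep (red green blue : List (List Int)) (interval : Int) (y : Int)
    (st : List (List Int) × List (List Int) × List (List Int) × Int) (x : Int) :
    List (List Int) × List (List Int) × List (List Int) × Int :=
  let diff := PySem.List.pyGetD (PySem.List.pyGetD blue y []) x 0 - gOne st.2.2.2 interval
  let rB := msetA st.2.2.1 y x (gFile diff interval)
  let diff2 := PySem.List.pyGetD (PySem.List.pyGetD green y []) x 0 -
               gOne (PySem.List.pyGetD (PySem.List.pyGetD blue y []) x 0) interval
  let rG := msetA st.2.1 y x (gFile diff2 interval)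
  let diff3 := PySem.List.pyGetD (PySem.List.pyGetD red y []) x 0 -
               gOne (PySem.List.pyGetD (PySem.List.pyGetD green y []) x 0) interval
  let rR := msetA st.1 y x (gFile diff3 interval)
  (rR, rG, rB, PySem.List.pyGetD (PySem.List.pyGetD red y []) x 0)

def quantization (red : List (List Int)) (green : List (List Int)) (blue : List (List Int)) (bits : Int) : List (List Int) × List (List Int) × List (List Int) :=
  let height : Int := red.length
  let width : Int := (PySem.List.pyGetD red 0 []).length
  let interval : Int := 2 ^ (8 - bits).toNat  -- 2 ** (8-bits); exact for bits ≤ 8 (Pre_); Python yields floats otherwise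
  let resultRed := (PySem.List.pyRange 0 height).map (fun _ => (PySem.List.pyRange 0 width).map (fun _ => (0 : Int)))
  let resultGreen := (PySem.List.pyRange 0 height).map (fun _ => (PySem.List.pyRange 0 width).map (fun _ => (0 : Int)))
  let resultBlue := (PySem.List.pyRange 0 height).map (fun _ => (PySem.List.pyRange 0 width).map (fun _ => (0 : Int)))
  let final := (PySem.List.pyRange 0 height).foldl
    (fun st y => (PySem.List.pyRange 0 width).foldl (fun st x => pixelStep red green blue interval y st x) st)
    (resultRed, resultGreen, resultBlue, (0 : Int))
  (final.1, final.2.1, final.2.2.1)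

-- ===== PORT B =====
def quantization_alt (red : List (List Int)) (green : List (List Int)) (blue : List (List Int)) (bits : Int) : List (List Int) × List (List Int) × List (List Int) :=
  let height := red.length
  let width := (red.headD []).length
  let interval : Int := 2 ^ (8 - bits).toNat  -- 2 ** (8-bits); exact for bits ≤ 8 (Pre_)
  let q : Int → Int := fun v => PySem.Int.floordiv v interval * interval + PySem.Int.floordiv interval 2
  -- flatten each channel into a row-major 1-D stream (m[y][x]; in range on Pre_)
  let flat : List (List Int) → List Int := fun m =>
    (List.range height).flatMap (fun y => (List.range width).map (fun x => (m.getD y []).getD x 0))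
  let flatR := flat red
  let flatG := flat green
  let flatB := flat blue
  -- element-wise zips of (possibly shifted) streams
  let outR := (flatR.zip flatG).map (fun p => gFile (p.1 - q p.2) interval)
  let outG := (flatG.zip flatB).map (fun p => gFile (p.1 - q p.2) interval)
  let outB := (flatB.zip ((0 : Int) :: flatR)).map (fun p => gFile (p.1 - q p.2) interval)
  -- reshape: flat[y*width:(y+1)*width]; nonnegative in-range slice = drop-then-take (exact here)
  let chunk : List Int → List (List Int) := fun l =>
    (List.range height).map (fun y => (l.drop (y * width)).take width)
  (chunk outR, chunk outG, chunk outB)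

-- ===== PRECONDITION & SPEC =====
-- Pre_ excludes exactly the inputs where Python A does not return int matrices: red = [] and
-- too-short rows/row-lists raise IndexError, and bits > 8 makes interval = 2**(8-bits) a float
-- (float results, not values of the declared type).
def Pre_quantization (red : List (List Int)) (green : List (List Int)) (blue : List (List Int)) (bits : Int) : Prop :=
  red ≠ [] ∧ bits ≤ 8 ∧
  red.length ≤ green.length ∧ red.length ≤ blue.length ∧
  (∀ r ∈ red, (red.headD []).length ≤ r.length) ∧
  (∀ r ∈ green.take red.length, (red.headD []).length ≤ r.length) ∧
  (∀ r ∈ blue.take red.length, (red.headD []).length ≤ r.length)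
instance (red : List (List Int)) (green : List (List Int)) (blue : List (List Int)) (bits : Int) : Decidable (Pre_quantization red green blue bits) := by unfold Pre_quantization; infer_instance

def pvWitness_quantization : List (List Int) × List (List Int) × List (List Int) × Int :=
  ([[10, 20], [30, 40]], [[1, 2], [3, 4]], [[5, 6], [7, 8]], 6)

def Spec_quantization (red : List (List Int)) (green : List (List Int)) (blue : List (List Int)) (bits : Int) (out : List (List Int) × List (List Int) × List (List Int)) : Prop := out = quantization_alt red green blue bits
instance (red : List (List Int)) (green : List (List Int)) (blue : List (List Int)) (bits : Int) (out : List (List Int) × List (List Int) × List (List Int)) : Decidable (Spec_quantization red green blue bits out) := by unfold Spec_quantization; infer_instance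

-- ===== CLAIM (what is proved, stated in full; the proofs are below) =====
def Claim_equal_quantization : Prop := ∀ (red : List (List Int)) (green : List (List Int)) (blue : List (List Int)) (bits : Int), Dom_quantization red green blue bits → Pre_quantization red green blue bits → Spec_quantization red green blue bits (quantization red green blue bits)

-- ===== LEMMAS AND PROOFS =====

-- element access used in the characterisation
def px (m : List (List Int)) (y x : Nat) : Int := (m.getD y []).getD x 0

-- the previous-red value entering pixel (y, x) of A's row-major scan
def prevF (red : List (List Int)) (w : Nat) (y x : Nat) : Int :=
  if 0 < x then px red y (x - 1) else if 0 < y then px red (y - 1) (w - 1) else 0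

-- the three per-pixel result values
def fR (red green : List (List Int)) (iv : Int) (y x : Nat) : Int :=
  gFile (px red y x - gOne (px green y x) iv) iv
def fG (green blue : List (List Int)) (iv : Int) (y x : Nat) : Int :=
  gFile (px green y x - gOne (px blue y x) iv) iv
def fB (red blue : List (List Int)) (iv : Int) (w : Nat) (y x : Nat) : Int :=
  gFile (px blue y x - gOne (prevF red w y x) iv) iv

-- the common middle form: A's fold and B's pipeline both equal these nested maps
def nestedOf (f : Nat → Nat → Int) (h w : Nat) : List (List Int) :=
  (List.range h).map (fun y => (List.range w).map (f y))

lemma set_map_range_append {α : Type} {v : α} (f : Nat → α) (n : Nat) (l : List α) (hn : n < l.length)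
    (hv : v = f n) :
    ((List.range n).map f ++ l.drop n).set n v = (List.range (n + 1)).map f ++ l.drop (n + 1) := by
  rw [List.drop_eq_getElem_cons hn, List.set_append]
  rw [if_neg (by simp)]
  simp only [List.length_map, List.length_range, Nat.sub_self, List.set_cons_zero]
  simp [List.range_succ, hv]

lemma inner_fold (red green blue : List (List Int)) (iv : Int) (w y : Nat)
    (n : Nat) (hn : n ≤ w)
    (mR mG mB : List (List Int)) (hyR : y < mR.length) (hyG : y < mG.length) (hyB : y < mB.length)
    (hR : (mR.getD y []).length = w) (hG : (mG.getD y []).length = w) (hB : (mB.getD y []).length = w) :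
    (List.range n).foldl
        (fun st (x : Nat) => pixelStep red green blue iv (y : Int) st (x : Int))
        (mR, mG, mB, prevF red w y 0)
    = (mR.set y ((List.range n).map (fR red green iv y) ++ (mR.getD y []).drop n),
       mG.set y ((List.range n).map (fG green blue iv y) ++ (mG.getD y []).drop n),
       mB.set y ((List.range n).map (fB red blue iv w y) ++ (mB.getD y []).drop n),
       prevF red w y n) := by
  induction n with
  | zero =>
    simp only [List.range_zero, List.map_nil, List.foldl_nil, List.nil_append, List.drop_zero]
    rw [List.getD_eq_getElem mR [] hyR, List.getD_eq_getElem mG [] hyG, List.getD_eq_getElem mB [] hyB,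
        List.set_getElem_self hyR, List.set_getElem_self hyG, List.set_getElem_self hyB]
  | succ n ih =>
    have hnw : n < w := hn
    have hnR : n < (mR.getD y []).length := by omega
    have hnG : n < (mG.getD y []).length := by omega
    have hnB : n < (mB.getD y []).length := by omega
    rw [List.range_succ, List.foldl_append, ih (by omega)]
    simp only [List.foldl_cons, List.foldl_nil]
    unfold pixelStep msetA
    simp only [PySem.List.pyGetD_natCast, PySem.List.pySetD_natCast]
    have getR : ∀ (m : List (List Int)) (R : List Int), y < m.length → (m.set y R).getD y [] = R := by
      intro m R h
      rw [List.getD_eq_getElem _ [] (by simpa using h)]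
      exact List.getElem_set_self (by simpa using h)
    rw [getR _ _ hyR, getR _ _ hyG, getR _ _ hyB]
    rw [List.set_set, List.set_set, List.set_set]
    rw [set_map_range_append (fB red blue iv w y) n (mB.getD y []) hnB (by simp [fB, px]),
        set_map_range_append (fG green blue iv y) n (mG.getD y []) hnG (by simp [fG, px]),
        set_map_range_append (fR red green iv y) n (mR.getD y []) hnR (by simp [fR, px])]
    have hprev : (red.getD y []).getD n 0 = prevF red w y (n + 1) := by
      simp [prevF, px]
    rw [hprev]
    simp [List.range_succ]

lemma outer_fold (red green blue : List (List Int)) (iv : Int) (w h : Nat) (hw : 0 < w)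
    (m0 : List (List Int)) (hm0 : m0 = (List.range h).map (fun _ => (List.range w).map (fun _ => (0 : Int))))
    (n : Nat) (hn : n ≤ h) :
    (List.range n).foldl
        (fun st (y : Nat) => (List.range w).foldl
          (fun st (x : Nat) => pixelStep red green blue iv (y : Int) st (x : Int)) st)
        (m0, m0, m0, (0 : Int))
    = ((List.range n).map (fun y => (List.range w).map (fR red green iv y)) ++ m0.drop n,
       (List.range n).map (fun y => (List.range w).map (fG green blue iv y)) ++ m0.drop n,
       (List.range n).map (fun y => (List.range w).map (fB red blue iv w y)) ++ m0.drop n,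
       prevF red w n 0) := by
  induction n with
  | zero => simp [prevF]
  | succ n ih =>
    have hnh : n < h := hn
    have hlm0 : m0.length = h := by simp [hm0]
    rw [List.range_succ, List.foldl_append, ih (by omega)]
    simp only [List.foldl_cons, List.foldl_nil]
    have hrow : ∀ (f : Nat → List Int),
        ((List.range n).map f ++ m0.drop n).getD n [] = (List.range w).map (fun _ => (0 : Int)) := by
      intro f
      rw [List.getD_append_right _ _ _ _ (by simp)]
      simp only [List.length_map, List.length_range, Nat.sub_self]
      simp [hm0, List.getD, hnh]
    have hlen : ∀ (f : Nat → List Int), n < ((List.range n).map f ++ m0.drop n).length := by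
      intro f; simp [hlm0]; omega
    rw [inner_fold red green blue iv w n w le_rfl _ _ _ (hlen _) (hlen _) (hlen _)
        (by rw [hrow]; simp) (by rw [hrow]; simp) (by rw [hrow]; simp)]
    rw [hrow, hrow, hrow]
    have hdrop : List.drop w (List.map (fun _ => (0 : Int)) (List.range w)) = ([] : List Int) := by simp
    rw [hdrop]
    simp only [List.append_nil]
    have hm0n : n < m0.length := by omega
    rw [set_map_range_append (fun y => List.map (fR red green iv y) (List.range w)) n m0 hm0n rfl,
        set_map_range_append (fun y => List.map (fG green blue iv y) (List.range w)) n m0 hm0n rfl,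
        set_map_range_append (fun y => List.map (fB red blue iv w y) (List.range w)) n m0 hm0n rfl]
    have hprev : prevF red w n w = prevF red w (n + 1) 0 := by simp [prevF, hw]
    rw [hprev]
    simp [List.range_succ]

-- A equals the nested-map middle form
lemma A_eq_nested (red green blue : List (List Int)) (bits : Int) :
    quantization red green blue bits =
      (nestedOf (fR red green (2 ^ (8 - bits).toNat)) red.length (red.headD []).length,
       nestedOf (fG green blue (2 ^ (8 - bits).toNat)) red.length (red.headD []).length,
       nestedOf (fB red blue (2 ^ (8 - bits).toNat) (red.headD []).length) red.length (red.headD []).length) := by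
  have hhd : red.getD 0 [] = red.headD [] := by cases red <;> rfl
  unfold quantization nestedOf
  simp only [PySem.List.pyGetD_zero, hhd, PySem.List.pyRange_zero_natCast, List.foldl_map,
    List.map_map, Function.comp_def]
  by_cases hw0 : (red.headD []).length = 0
  · have hw0' : (red.head?.getD []).length = 0 := by
      simpa [List.headD_eq_head?] using hw0
    simp [hw0', List.foldl_fixed]
  · rw [outer_fold red green blue (2 ^ (8 - bits).toNat) (red.headD []).length red.length
        (Nat.pos_of_ne_zero hw0) _ rfl red.length le_rfl]
    simp

-- flattened list of constant-width rows: dropping y whole rows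
lemma flatten_drop (w : Nat) (L : List (List Int)) (hw : ∀ r ∈ L, r.length = w) :
    ∀ (y : Nat) (hy : y < L.length),
      L.flatten.drop (y * w) = L[y] ++ (L.drop (y + 1)).flatten := by
  induction L with
  | nil => intro y hy; simp at hy
  | cons r rs ih =>
    intro y hy
    cases y with
    | zero => simp
    | succ y =>
      have hr : r.length = w := hw r (by simp)
      have hlen : (y + 1) * w = r.length + y * w := by
        rw [hr]; ring
      rw [List.flatten_cons, hlen, List.drop_append]
      rw [List.drop_of_length_le (Nat.le_add_right _ _), List.nil_append, Nat.add_sub_cancel_left]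
      have hy' : y < rs.length := by simpa using hy
      rw [ih (fun s hs => hw s (by simp [hs])) y hy']
      simp

lemma chunk_flatten (w : Nat) (L : List (List Int)) (hw : ∀ r ∈ L, r.length = w)
    (y : Nat) (hy : y < L.length) :
    (L.flatten.drop (y * w)).take w = L[y] := by
  rw [flatten_drop w L hw y hy, List.take_append]
  have hr : L[y].length = w := hw _ (List.getElem_mem hy)
  rw [List.take_of_length_le (le_of_eq hr), hr, Nat.sub_self, List.take_zero, List.append_nil]

-- chunk y of the red stream delayed by one pixel = the previous-red row
lemma shift_chunk (red : List (List Int)) (w : Nat) (hwpos : 0 < w) (h : Nat)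
    (y : Nat) (hy : y < h) :
    ((((0 : Int) :: ((List.range h).map (fun y => (List.range w).map (px red y))).flatten).drop (y * w)).take w)
      = (List.range w).map (prevF red w y) := by
  obtain ⟨w', rfl⟩ : ∃ w', w = w' + 1 := ⟨w - 1, by omega⟩
  set F := (List.range h).map (fun y => (List.range (w' + 1)).map (px red y)) with hF
  have hwF : ∀ r ∈ F, r.length = w' + 1 := by
    intro r hr
    simp only [hF, List.mem_map] at hr
    obtain ⟨a, _, rfl⟩ := hr
    simp
  have hFlen : F.length = h := by simp [hF]
  have hRHS : (List.range (w' + 1)).map (prevF red (w' + 1) y)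
      = prevF red (w' + 1) y 0 :: (List.range w').map (px red y) := by
    rw [List.range_succ_eq_map]
    simp only [List.map_cons, List.map_map, Function.comp_def]
    congr 1
  rw [hRHS]
  cases y with
  | zero =>
    simp only [Nat.zero_mul, List.drop_zero, List.take_succ_cons]
    congr 1
    have hchunk : F.flatten.take (w' + 1) = F[0]'(by omega) := by
      simpa using chunk_flatten (w' + 1) F hwF 0 (by omega)
    have ht : F.flatten.take w' = (F.flatten.take (w' + 1)).take w' := by
      rw [List.take_take]; congr 1; omega
    rw [ht, hchunk]
    simp only [hF, List.getElem_map, List.getElem_range]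
    rw [← List.map_take, List.take_range, Nat.min_eq_left (by omega)]
  | succ y =>
    have hy' : y + 1 < F.length := by omega
    have hyF : y < F.length := by omega
    have hmul : (y + 1) * (w' + 1) = (y * (w' + 1) + w') + 1 := by ring
    rw [hmul, List.drop_succ_cons]
    have hdd : F.flatten.drop (y * (w' + 1) + w') = (F.flatten.drop (y * (w' + 1))).drop w' := by
      rw [List.drop_drop]
    rw [hdd, flatten_drop (w' + 1) F hwF y hyF]
    have hry : (F[y]'hyF).length = w' + 1 := hwF _ (List.getElem_mem hyF)
    rw [List.drop_append]
    have h1 : (F[y]'hyF).drop w' = [px red y w'] := by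
      simp only [hF, List.getElem_map, List.getElem_range]
      rw [List.range_succ, List.map_append, List.drop_left' (by simp)]
      rfl
    rw [h1]
    have h2 : w' - (F[y]'hyF).length = 0 := by omega
    rw [h2, List.drop_zero]
    have hdropF : F.drop (y + 1) = (F[y + 1]'hy') :: F.drop (y + 2) := List.drop_eq_getElem_cons hy'
    rw [hdropF, List.flatten_cons, List.cons_append, List.take_succ_cons]
    congr 1
    rw [List.nil_append, List.take_append]
    have hry1 : (F[y + 1]'hy').length = w' + 1 := hwF _ (List.getElem_mem hy')
    have hz : w' - (F[y + 1]'hy').length = 0 := by omega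
    rw [hz, List.take_zero, List.append_nil]
    simp only [hF, List.getElem_map, List.getElem_range]
    rw [← List.map_take, List.take_range, Nat.min_eq_left (by omega)]

-- B equals the nested-map middle form
lemma B_eq_nested (red green blue : List (List Int)) (bits : Int) :
    quantization_alt red green blue bits =
      (nestedOf (fR red green (2 ^ (8 - bits).toNat)) red.length (red.headD []).length,
       nestedOf (fG green blue (2 ^ (8 - bits).toNat)) red.length (red.headD []).length,
       nestedOf (fB red blue (2 ^ (8 - bits).toNat) (red.headD []).length) red.length (red.headD []).length) := by
  unfold quantization_alt nestedOf
  by_cases hw0 : (red.headD []).length = 0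
  · have hw0' : (red.head?.getD []).length = 0 := by
      simpa [List.headD_eq_head?] using hw0
    simp [hw0']
  have hwpos : 0 < (red.headD []).length := Nat.pos_of_ne_zero hw0
  -- flat m = (rows of m).flatten
  have hflat : ∀ m : List (List Int),
      (List.range red.length).flatMap (fun y => (List.range (red.headD []).length).map (fun x => (m.getD y []).getD x 0))
        = ((List.range red.length).map (fun y => (List.range (red.headD []).length).map (px m y))).flatten := by
    intro m
    rw [List.flatMap_def]
    rfl
  have hrows : ∀ (m : List (List Int)) (r : List Int),
      r ∈ (List.range red.length).map (fun y => (List.range (red.headD []).length).map (px m y)) → r.length = (red.headD []).length := by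
    intro m r hr
    simp only [List.mem_map] at hr
    obtain ⟨a, _, rfl⟩ := hr
    simp
  refine Prod.ext ?_ (Prod.ext ?_ ?_)
  all_goals {
    simp only [hflat]
    apply List.map_congr_left
    intro y hy
    have hyh : y < red.length := List.mem_range.mp hy
    rw [List.map_zip_eq_zipWith, List.drop_zipWith, List.take_zipWith]
    first
    | -- red / green channels: two plain streams
      (rw [chunk_flatten (red.headD []).length _ (hrows _) y (by simpa using hyh),
           chunk_flatten (red.headD []).length _ (hrows _) y (by simpa using hyh)]
       simp only [List.getElem_map, List.getElem_range]
       rw [List.zipWith_map, List.zipWith_self]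
       apply List.map_congr_left
       intro x _
       simp [Function.curry, fR, fG, gOne, px])
    | -- blue channel: blue stream zipped with the delayed red stream
      (rw [chunk_flatten (red.headD []).length _ (hrows _) y (by simpa using hyh),
           shift_chunk red (red.headD []).length hwpos red.length y hyh]
       simp only [List.getElem_map, List.getElem_range]
       rw [List.zipWith_map, List.zipWith_self]
       apply List.map_congr_left
       intro x _
       simp [Function.curry, fB, gOne, px])
  }

-- ===== VERDICT (by name: the statement is the Claim_ definition above) =====
theorem quantization_spec : Claim_equal_quantization := by
  intro red green blue bits _ _
  unfold Spec_quantization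
  rw [A_eq_nested, B_eq_nested]
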